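-- pv_equiv track=rewrite | github.com/sinya3558/Study_4 | ChaeyeonPark/[PYT]/101_공원.py | solution
-- ===== SOURCE A (Python) =====
-- def solution(mats, park):
--     answer = -1
--     space=[[0]*len(park[0]) for _ in range(len(park))]
--     maxv=0
--
--     #공원의 비어있는 공간으로 만들 수 있는 가장 큰 정사각형 구하기
--     for i in range(len(park)):
--         for j in range(len(park[0])):
--             if park[i][j]=="-1":
--                 if i==0 or j==0:
--                     space[i][j]=1
--                 else:
--                     space[i][j]=1+min(space[i-1][j], space[i-1][j-1], space[i][j-1])
--                 maxv=max(maxv, space[i][j])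
--
--     #지민이가 가진 돗자리 중 깔 수 있는 가장 큰 돗자리 고르기
--     mats.sort(reverse=True)
--     for i in mats:
--         if maxv>=i:
--             answer=i
--             break
--
--     return answer
-- ===== SOURCE B (Python) =====
-- def solution(mats, park):
--     # Prefix-sum + binary-search re-implementation (A sorts mats in place; B does not mutate mats;
--     # equivalence is about the return value only).
--     h, w = len(park), len(park[0])
--     # P[i][j] = number of blocked cells (value != "-1") in park[0:i][0:j]
--     P = [[0] * (w + 1)]
--     for i in range(h):
--         prev = P[-1]
--         row = [0]
--         for j in range(w):
--             row.append(prev[j + 1] + row[-1] - prev[j] + (park[i][j] != "-1"))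
--         P.append(row)
--
--     def feasible(s):
--         for i in range(h - s + 1):
--             for j in range(w - s + 1):
--                 if P[i + s][j + s] - P[i][j + s] - P[i + s][j] + P[i][j] == 0:
--                     return True
--         return False
--
--     lo, hi = 0, min(h, w)  # invariant: feasible(lo) holds
--     while lo < hi:
--         mid = (lo + hi + 1) // 2
--         if feasible(mid):
--             lo = mid
--         else:
--             hi = mid - 1
--
--     return max((m for m in mats if m <= lo), default=-1)
-- ===== Notes on version B (the rewrite author's own statement) =====
-- stated objective: alternative
-- what changed: Replaces the min-of-three-neighbours largest-square DP table by a 2D prefix-sum table over blocked cells plus a binary search on the square side (O(1) window emptiness checks), and replaces sort-then-scan mat selection by a max over the mats that fit; Pre_ excludes ragged parks (A raises IndexError) and the empty park, where A only returns because park[0] sits inside a comprehension that never runs, while B's prefix-sum build reads len(park[0]) and raises.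
-- outside the precondition, e.g. on solution([], []): A returns -1, B raises IndexError; on solution([-2, 3], []): A returns -2, B raises IndexError
import Mathlib
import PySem

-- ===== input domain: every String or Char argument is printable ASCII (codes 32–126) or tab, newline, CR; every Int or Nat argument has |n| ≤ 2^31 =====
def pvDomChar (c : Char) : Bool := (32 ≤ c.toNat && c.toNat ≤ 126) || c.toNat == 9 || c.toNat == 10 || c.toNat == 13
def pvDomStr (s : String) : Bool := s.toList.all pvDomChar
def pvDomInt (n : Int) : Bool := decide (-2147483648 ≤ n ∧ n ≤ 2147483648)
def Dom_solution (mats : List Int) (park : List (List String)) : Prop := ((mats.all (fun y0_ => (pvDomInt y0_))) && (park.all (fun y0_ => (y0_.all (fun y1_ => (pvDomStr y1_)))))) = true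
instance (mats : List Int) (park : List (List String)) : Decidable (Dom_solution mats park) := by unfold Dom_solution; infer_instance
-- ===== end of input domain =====

-- B replaces A's min-of-three largest-square DP by a prefix-sum table plus a binary search on the
-- square side, and replaces sort-then-scan mat selection by a max over the fitting mats; A sorts
-- `mats` in place (B does not): the equivalence proved is about the return value only.

-- ===== PORT A =====
-- space[i][j] read and write (rows are independent lists; Python mutates row i in place)
def pvGet2 (space : List (List Int)) (i j : Nat) : Int := (space.getD i []).getD j 0

def pvSet2 (space : List (List Int)) (i j : Nat) (v : Int) : List (List Int) :=
  space.set i ((space.getD i []).set j v)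

-- body of A's inner loop at cell (i, j): state = (space, maxv)
def pvAStep (park : List (List String)) (i j : Nat) (st : List (List Int) × Int) :
    List (List Int) × Int :=
  if (park.getD i []).getD j "" = "-1" then
    let v : Int :=
      if i = 0 ∨ j = 0 then 1
      else 1 + min (min (pvGet2 st.1 (i-1) j) (pvGet2 st.1 (i-1) (j-1))) (pvGet2 st.1 i (j-1))
    (pvSet2 st.1 i j v, max st.2 v)
  else st

def solution (mats : List Int) (park : List (List String)) : Int :=
  let h := park.length
  let w := (park.getD 0 []).length
  let space0 : List (List Int) := (List.range h).map (fun _ => List.replicate w 0)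
  let st := (List.range h).foldl (fun st i =>
      (List.range w).foldl (fun st j => pvAStep park i j st) st) (space0, 0)
  let maxv := st.2
  let ms := PySem.List.sorted mats (fun x => x) true
  ((ms.find? (fun m => decide (m ≤ maxv))).getD (-1))

-- ===== PORT B =====
-- P[i][j] lookup reuses pvGet2 (same 2D getD access as A's space table)
-- inner loop of the prefix-sum build: extends the new row cell by cell (row[-1] = last entry)
def pvNextRow (parkRow : List String) (prev : List Int) (w : Nat) : List Int :=
  (List.range w).foldl (fun row j =>
    row ++ [prev.getD (j+1) 0 + (row.getLast?.getD 0) - prev.getD j 0 +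
            (if (parkRow.getD j "") ≠ "-1" then 1 else 0)]) [0]

-- P = (h+1)×(w+1) prefix sums of blocked cells; P[-1] = last row so far
def pvBuildP (park : List (List String)) (h w : Nat) : List (List Int) :=
  (List.range h).foldl (fun P i =>
    P ++ [pvNextRow (park.getD i []) (P.getLast?.getD []) w]) [List.replicate (w+1) 0]

-- feasible(s): some s×s window with blocked-count 0 (O(1) per window via P)
def pvFeasible (P : List (List Int)) (h w s : Nat) : Bool :=
  (List.range (h - s + 1)).any (fun i =>
    (List.range (w - s + 1)).any (fun j =>
      pvGet2 P (i+s) (j+s) - pvGet2 P i (j+s) - pvGet2 P (i+s) j + pvGet2 P i j == 0))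

-- while lo < hi: mid = (lo+hi+1)//2; feasible(mid) → lo = mid else hi = mid-1
def pvBSearch (f : Nat → Bool) (lo hi : Nat) : Nat :=
  if _h : lo < hi then
    if f ((lo + hi + 1) / 2) then pvBSearch f ((lo + hi + 1) / 2) hi
    else pvBSearch f lo ((lo + hi + 1) / 2 - 1)
  else lo
termination_by hi - lo
decreasing_by all_goals omega

def solution_alt (mats : List Int) (park : List (List String)) : Int :=
  let h := park.length
  let w := (park.getD 0 []).length
  let P := pvBuildP park h w
  let lo := pvBSearch (fun s => pvFeasible P h w s) 0 (min h w)
  ((PySem.List.max? (mats.filter (fun m => decide (m ≤ (lo : Int)))) (fun x => x)).getD (-1))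

-- ===== PRECONDITION & SPEC =====
-- Pre_ excludes ragged parks (some row shorter than row 0: Python A raises IndexError at
-- park[i][j]) and the empty park, where A only returns a value because len(park[0]) sits inside
-- a comprehension that never runs, while B's prefix-sum build reads len(park[0]) and raises.
def Pre_solution (mats : List Int) (park : List (List String)) : Prop :=
  park ≠ [] ∧ ∀ row ∈ park, (park.getD 0 []).length ≤ row.length
instance (mats : List Int) (park : List (List String)) : Decidable (Pre_solution mats park) := by
  unfold Pre_solution; infer_instance

def pvWitness_solution : List Int × List (List String) :=
  ([3, 1], [["-1", "-1"], ["-1", "x"]])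

def Spec_solution (mats : List Int) (park : List (List String)) (out : Int) : Prop := out = solution_alt mats park
instance (mats : List Int) (park : List (List String)) (out : Int) : Decidable (Spec_solution mats park out) := by unfold Spec_solution; infer_instance

-- ===== CLAIM (what is proved, stated in full; the proofs are below) =====
def Claim_equal_solution : Prop := ∀ (mats : List Int) (park : List (List String)), Dom_solution mats park → Pre_solution mats park → Spec_solution mats park (solution mats park)

-- ===== LEMMAS AND PROOFS =====


def pvEmp (park : List (List String)) (i j : Nat) : Prop :=
  (park.getD i []).getD j "" = "-1"

def pvBest (park : List (List String)) : Nat → Nat → Nat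
  | i, j =>
    if (park.getD i []).getD j "" = "-1" then
      if _h : i = 0 ∨ j = 0 then 1
      else 1 + min (min (pvBest park (i-1) j) (pvBest park (i-1) (j-1))) (pvBest park i (j-1))
    else 0
termination_by i j => i + j
decreasing_by all_goals omega

def pvSq (park : List (List String)) (i j s : Nat) : Prop :=
  s ≤ i + 1 ∧ s ≤ j + 1 ∧ ∀ a < s, ∀ b < s, pvEmp park (i - a) (j - b)

lemma pvSq_zero (park : List (List String)) (i j : Nat) : pvSq park i j 0 :=
  ⟨Nat.zero_le _, Nat.zero_le _, fun a ha => absurd ha (by omega)⟩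

lemma pvBest_sq (park : List (List String)) (i j : Nat) : pvSq park i j (pvBest park i j) := by
  have H : ∀ n i j, i + j = n → pvSq park i j (pvBest park i j) := by
    intro n
    induction n using Nat.strong_induction_on with
    | _ n IH =>
      rintro i j rfl
      rw [pvBest]
      by_cases hE : (park.getD i []).getD j "" = "-1"
      · rw [if_pos hE]
        by_cases h0 : i = 0 ∨ j = 0
        · rw [dif_pos h0]
          refine ⟨by omega, by omega, ?_⟩
          intro a ha b hb
          have ha0 : a = 0 := by omega
          have hb0 : b = 0 := by omega
          subst ha0; subst hb0
          simpa [pvEmp] using hE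
        · rw [dif_neg h0]
          have hi : 0 < i := by omega
          have hj : 0 < j := by omega
          have S1 := IH ((i-1) + j) (by omega) (i-1) j rfl
          have S2 := IH ((i-1) + (j-1)) (by omega) (i-1) (j-1) rfl
          have S3 := IH (i + (j-1)) (by omega) i (j-1) rfl
          set B1 := pvBest park (i-1) j with hB1
          set B2 := pvBest park (i-1) (j-1) with hB2
          set B3 := pvBest park i (j-1) with hB3
          refine ⟨by have := S1.1; omega, by have := S3.2.1; omega, ?_⟩
          intro a ha b hb
          rcases Nat.eq_zero_or_pos a with ha0 | hapos
          · rcases Nat.eq_zero_or_pos b with hb0 | hbpos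
            · subst ha0; subst hb0; simpa [pvEmp] using hE
            · subst ha0
              have h1 : b - 1 < B3 := by omega
              have := S3.2.2 0 (by omega) (b-1) h1
              rwa [show j - 1 - (b-1) = j - b from by omega] at this
          · rcases Nat.eq_zero_or_pos b with hb0 | hbpos
            · subst hb0
              have h1 : a - 1 < B1 := by omega
              have := S1.2.2 (a-1) h1 0 (by omega)
              rwa [show (i-1) - (a-1) = i - a from by omega,
                   show j - 0 = j - 0 from rfl] at this
            · have h1 : a - 1 < B2 := by omega
              have h2 : b - 1 < B2 := by omega
              have := S2.2.2 (a-1) h1 (b-1) h2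
              rwa [show (i-1) - (a-1) = i - a from by omega,
                   show (j-1) - (b-1) = j - b from by omega] at this
      · rw [if_neg hE]; exact pvSq_zero park i j
  exact H (i + j) i j rfl

lemma pvSq_le_best (park : List (List String)) (i j s : Nat) (h : pvSq park i j s) :
    s ≤ pvBest park i j := by
  have H : ∀ n i j, i + j = n → ∀ s, pvSq park i j s → s ≤ pvBest park i j := by
    intro n
    induction n using Nat.strong_induction_on with
    | _ n IH =>
      rintro i j rfl s hs
      rcases Nat.eq_zero_or_pos s with hs0 | hspos
      · omega
      have hE : (park.getD i []).getD j "" = "-1" := by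
        have := hs.2.2 0 (by omega) 0 (by omega)
        simpa [pvEmp] using this
      rw [pvBest, if_pos hE]
      by_cases h0 : i = 0 ∨ j = 0
      · rw [dif_pos h0]
        rcases h0 with h0 | h0 <;> [skip; skip] <;>
          · have := hs.1; have := hs.2.1; omega
      · rw [dif_neg h0]
        have hi : 0 < i := by omega
        have hj : 0 < j := by omega
        have T1 : pvSq park (i-1) j (s-1) := by
          refine ⟨by have := hs.1; omega, by have := hs.2.1; omega, ?_⟩
          intro a ha b hb
          have := hs.2.2 (a+1) (by omega) b (by omega)
          rwa [show i - (a+1) = (i-1) - a from by omega] at this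
        have T2 : pvSq park (i-1) (j-1) (s-1) := by
          refine ⟨by have := hs.1; omega, by have := hs.2.1; omega, ?_⟩
          intro a ha b hb
          have := hs.2.2 (a+1) (by omega) (b+1) (by omega)
          rwa [show i - (a+1) = (i-1) - a from by omega,
               show j - (b+1) = (j-1) - b from by omega] at this
        have T3 : pvSq park i (j-1) (s-1) := by
          refine ⟨by have := hs.1; omega, by have := hs.2.1; omega, ?_⟩
          intro a ha b hb
          have := hs.2.2 a (by omega) (b+1) (by omega)
          rwa [show j - (b+1) = (j-1) - b from by omega] at this
        have L1 := IH ((i-1) + j) (by omega) (i-1) j rfl (s-1) T1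
        have L2 := IH ((i-1) + (j-1)) (by omega) (i-1) (j-1) rfl (s-1) T2
        have L3 := IH (i + (j-1)) (by omega) i (j-1) rfl (s-1) T3
        omega
  exact H (i + j) i j rfl s h

def pvWin (park : List (List String)) (h w s : Nat) : Prop :=
  ∃ i j, i + s ≤ h ∧ j + s ≤ w ∧ ∀ a < s, ∀ b < s, pvEmp park (i + a) (j + b)

def pvRowMax (park : List (List String)) (w r : Nat) : Nat :=
  (Finset.range w).sup (pvBest park r)

def pvMA (park : List (List String)) (h w : Nat) : Nat :=
  (Finset.range h).sup (pvRowMax park w)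

lemma pvWin_zero (park : List (List String)) (h w : Nat) : pvWin park h w 0 :=
  ⟨0, 0, by omega, by omega, fun a ha => absurd ha (by omega)⟩

lemma pvWin_mono (park : List (List String)) (h w s t : Nat) (hst : s ≤ t)
    (hw : pvWin park h w t) : pvWin park h w s := by
  obtain ⟨i, j, h1, h2, h3⟩ := hw
  exact ⟨i, j, by omega, by omega, fun a ha b hb => h3 a (by omega) b (by omega)⟩

lemma pvSq_win (park : List (List String)) (h w i j s : Nat) (hi : i < h) (hj : j < w)
    (hs : pvSq park i j s) : pvWin park h w s := by
  rcases Nat.eq_zero_or_pos s with hs0 | hspos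
  · subst hs0; exact pvWin_zero park h w
  refine ⟨i + 1 - s, j + 1 - s, by have := hs.1; omega, by have := hs.2.1; omega, ?_⟩
  intro a ha b hb
  have := hs.2.2 (s - 1 - a) (by omega) (s - 1 - b) (by omega)
  rwa [show i - (s - 1 - a) = i + 1 - s + a from by have := hs.1; omega,
       show j - (s - 1 - b) = j + 1 - s + b from by have := hs.2.1; omega] at this

lemma pvWin_sq (park : List (List String)) (h w s : Nat) (hspos : 0 < s)
    (hw : pvWin park h w s) : ∃ i < h, ∃ j < w, pvSq park i j s := by
  obtain ⟨i, j, h1, h2, h3⟩ := hw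
  refine ⟨i + s - 1, by omega, j + s - 1, by omega, ⟨by omega, by omega, ?_⟩⟩
  intro a ha b hb
  have := h3 (s - 1 - a) (by omega) (s - 1 - b) (by omega)
  rwa [show i + (s - 1 - a) = i + s - 1 - a from by omega,
       show j + (s - 1 - b) = j + s - 1 - b from by omega] at this

lemma pvBest_le_MA (park : List (List String)) (h w i j : Nat) (hi : i < h) (hj : j < w) :
    pvBest park i j ≤ pvMA park h w := by
  calc pvBest park i j ≤ pvRowMax park w i := Finset.le_sup (Finset.mem_range.2 hj)
    _ ≤ pvMA park h w := Finset.le_sup (Finset.mem_range.2 hi)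

lemma pvWin_le_MA (park : List (List String)) (h w s : Nat) (hw : pvWin park h w s) :
    s ≤ pvMA park h w := by
  rcases Nat.eq_zero_or_pos s with hs0 | hspos
  · omega
  obtain ⟨i, hi, j, hj, hsq⟩ := pvWin_sq park h w s hspos hw
  calc s ≤ pvBest park i j := pvSq_le_best park i j s hsq
    _ ≤ pvMA park h w := pvBest_le_MA park h w i j hi hj

lemma pvWin_MA (park : List (List String)) (h w : Nat) : pvWin park h w (pvMA park h w) := by
  rcases Nat.eq_zero_or_pos (pvMA park h w) with h0 | hpos
  · rw [h0]; exact pvWin_zero park h w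
  have hh : (Finset.range h).Nonempty := by
    rcases Nat.eq_zero_or_pos h with h0 | _
    · subst h0; simp [pvMA] at hpos
    · exact ⟨0, Finset.mem_range.2 (by omega)⟩
  obtain ⟨r, hr, hrEq⟩ := Finset.exists_mem_eq_sup (Finset.range h) hh (pvRowMax park w)
  have hw' : (Finset.range w).Nonempty := by
    rcases Nat.eq_zero_or_pos w with h0 | _
    · subst h0
      rw [pvMA, hrEq] at hpos
      simp [pvRowMax] at hpos
    · exact ⟨0, Finset.mem_range.2 (by omega)⟩
  obtain ⟨c, hc, hcEq⟩ := Finset.exists_mem_eq_sup (Finset.range w) hw' (pvBest park r)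
  have : pvMA park h w = pvBest park r c := by
    rw [pvMA, hrEq, pvRowMax, hcEq]
  rw [this]
  exact pvSq_win park h w r c _ (Finset.mem_range.1 hr) (Finset.mem_range.1 hc)
    (pvBest_sq park r c)

lemma pvMA_le_min (park : List (List String)) (h w : Nat) :
    pvMA park h w ≤ min h w := by
  obtain ⟨i, j, h1, h2, _⟩ := pvWin_MA park h w
  omega


def pvInd (park : List (List String)) (i j : Nat) : Nat :=
  if (park.getD i []).getD j "" = "-1" then 0 else 1

def pvRS (park : List (List String)) (i j : Nat) : Nat :=
  ∑ b ∈ Finset.range j, pvInd park i b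

def pvS (park : List (List String)) (i j : Nat) : Nat :=
  ∑ a ∈ Finset.range i, pvRS park a j

lemma pvRS_add (park : List (List String)) (i j s : Nat) :
    pvRS park i (j + s) = pvRS park i j + ∑ b ∈ Finset.range s, pvInd park i (j + b) := by
  induction s with
  | zero => simp
  | succ s ih =>
    rw [show j + (s+1) = (j + s) + 1 from rfl, pvRS, Finset.sum_range_succ, ← pvRS, ih,
        Finset.sum_range_succ]
    omega

lemma pvS_add (park : List (List String)) (i j s : Nat) :
    pvS park (i + s) j = pvS park i j + ∑ a ∈ Finset.range s, pvRS park (i + a) j := by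
  induction s with
  | zero => simp
  | succ s ih =>
    rw [show i + (s+1) = (i + s) + 1 from rfl, pvS, Finset.sum_range_succ, ← pvS, ih,
        Finset.sum_range_succ]
    omega

lemma pvS_rect (park : List (List String)) (i j s : Nat) :
    pvS park (i+s) (j+s) + pvS park i j
      = pvS park i (j+s) + pvS park (i+s) j
        + ∑ a ∈ Finset.range s, ∑ b ∈ Finset.range s, pvInd park (i+a) (j+b) := by
  have h1 := pvS_add park i (j+s) s
  have h2 := pvS_add park i j s
  have h3 : ∑ a ∈ Finset.range s, pvRS park (i+a) (j+s)
      = ∑ a ∈ Finset.range s, pvRS park (i+a) j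
        + ∑ a ∈ Finset.range s, ∑ b ∈ Finset.range s, pvInd park (i+a) (j+b) := by
    rw [← Finset.sum_add_distrib]
    exact Finset.sum_congr rfl (fun a _ => pvRS_add park (i+a) j s)
  omega

-- the built row i equals [S i 0, …, S i w]
lemma pvNextRow_eq (park : List (List String)) (i w : Nat) :
    pvNextRow (park.getD i []) ((List.range (w+1)).map (fun j => (pvS park i j : Int))) w
      = (List.range (w+1)).map (fun j => (pvS park (i+1) j : Int)) := by
  have key : ∀ m, m ≤ w →
      (List.range m).foldl (fun row j =>
        row ++ [((List.range (w+1)).map (fun j => (pvS park i j : Int))).getD (j+1) 0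
                + (row.getLast?.getD 0)
                - ((List.range (w+1)).map (fun j => (pvS park i j : Int))).getD j 0 +
                (if ((park.getD i []).getD j "") ≠ "-1" then 1 else 0)]) [0]
      = (List.range (m+1)).map (fun j => (pvS park (i+1) j : Int)) := by
    intro m hm
    induction m with
    | zero => simp [pvS, pvRS]
    | succ m ih =>
      rw [show List.range (m+1) = List.range m ++ [m] from List.range_succ, List.foldl_append]
      rw [ih (by omega)]
      simp only [List.foldl_cons, List.foldl_nil]
      rw [show List.range (m+1+1) = List.range (m+1) ++ [m+1] from List.range_succ,
          List.map_append]
      congr 1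
      have hLast : ((List.range (m+1)).map (fun j => (pvS park (i+1) j : Int))).getLast?
          = some ((pvS park (i+1) m : Int)) := by
        rw [show List.range (m+1) = List.range m ++ [m] from List.range_succ, List.map_append]
        exact List.getLast?_concat
      rw [hLast]
      rw [PySem.List.getD_map_range _ _ _ _ (by omega),
          PySem.List.getD_map_range _ _ _ _ (by omega)]
      have hS1 : pvS park (i+1) (m+1) + pvS park i m
          = pvS park i (m+1) + pvS park (i+1) m + pvInd park i m := by
        have a1 := pvS_add park i (m+1) 1
        have a2 := pvS_add park i m 1
        have a3 := pvRS_add park i m 1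
        simp only [Finset.sum_range_one, Nat.add_zero] at a1 a2 a3
        omega
      have hInd : (if ((park.getD i []).getD m "") ≠ "-1" then (1:Int) else 0)
          = (pvInd park i m : Int) := by
        by_cases hc : (park.getD i []).getD m "" = "-1"
        · simp [pvInd]
        · simp [pvInd]
      simp only [Option.getD_some, hInd]
      have : ((pvS park i (m+1) : Int)) + (pvS park (i+1) m : Int) - (pvS park i m : Int)
          + (pvInd park i m : Int) = (pvS park (i+1) (m+1) : Int) := by omega
      simp only [List.map_cons, List.map_nil]
      rw [List.cons_eq_cons]
      exact ⟨this, rfl⟩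
  exact key w le_rfl

lemma pvBuildP_eq (park : List (List String)) (h w : Nat) :
    pvBuildP park h w
      = (List.range (h+1)).map (fun i => (List.range (w+1)).map (fun j => (pvS park i j : Int))) := by
  have key : ∀ m, (List.range m).foldl (fun P i =>
        P ++ [pvNextRow (park.getD i []) (P.getLast?.getD []) w]) [List.replicate (w+1) 0]
      = (List.range (m+1)).map (fun i => (List.range (w+1)).map (fun j => (pvS park i j : Int))) := by
    intro m
    induction m with
    | zero =>
      simp only [List.range_zero, List.foldl_nil]
      rw [List.range_one]
      simp only [List.map_cons, List.map_nil]
      congr 1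
      simp [pvS, List.map_const', List.length_range]
    | succ m ih =>
      rw [show List.range (m+1) = List.range m ++ [m] from List.range_succ, List.foldl_append,
          ih]
      simp only [List.foldl_cons, List.foldl_nil]
      have hLast : ((List.range (m+1)).map
            (fun i => (List.range (w+1)).map (fun j => (pvS park i j : Int)))).getLast?
          = some ((List.range (w+1)).map (fun j => (pvS park m j : Int))) := by
        rw [show List.range (m+1) = List.range m ++ [m] from List.range_succ, List.map_append]
        exact List.getLast?_concat
      rw [hLast]
      rw [show List.range (m+1+1) = List.range (m+1) ++ [m+1] from List.range_succ,
          List.map_append]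
      congr 1
      simp only [Option.getD_some, List.map_cons, List.map_nil]
      rw [pvNextRow_eq park m w]
  exact key h

lemma pvGet2_build (park : List (List String)) (h w i j : Nat) (hi : i ≤ h) (hj : j ≤ w) :
    pvGet2 (pvBuildP park h w) i j = (pvS park i j : Int) := by
  rw [pvBuildP_eq, pvGet2, PySem.List.getD_map_range _ _ _ _ (by omega),
      PySem.List.getD_map_range _ _ _ _ (by omega)]

lemma pvInd_eq_zero (park : List (List String)) (i j : Nat) :
    pvInd park i j = 0 ↔ pvEmp park i j := by
  by_cases hc : (park.getD i []).getD j "" = "-1"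
  · simp only [pvInd, pvEmp, if_pos hc]
    simpa using hc
  · simp only [pvInd, pvEmp, if_neg hc]
    simpa using hc

lemma pvExpr_iff (park : List (List String)) (h w s i j : Nat)
    (hi : i + s ≤ h) (hj : j + s ≤ w) :
    (pvGet2 (pvBuildP park h w) (i+s) (j+s) - pvGet2 (pvBuildP park h w) i (j+s)
      - pvGet2 (pvBuildP park h w) (i+s) j + pvGet2 (pvBuildP park h w) i j = 0)
    ↔ ∀ a < s, ∀ b < s, pvEmp park (i + a) (j + b) := by
  rw [pvGet2_build park h w _ _ (by omega) (by omega),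
      pvGet2_build park h w _ _ (by omega) (by omega),
      pvGet2_build park h w _ _ (by omega) (by omega),
      pvGet2_build park h w _ _ (by omega) (by omega)]
  have hrect := pvS_rect park i j s
  have : ((pvS park (i+s) (j+s) : Int) - pvS park i (j+s) - pvS park (i+s) j + pvS park i j = 0)
      ↔ (∑ a ∈ Finset.range s, ∑ b ∈ Finset.range s, pvInd park (i+a) (j+b)) = 0 := by
    omega
  rw [this, Finset.sum_eq_zero_iff]
  constructor
  · intro hz a ha b hb
    have := hz a (Finset.mem_range.2 ha)
    rw [Finset.sum_eq_zero_iff] at this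
    exact (pvInd_eq_zero park _ _).1 (this b (Finset.mem_range.2 hb))
  · intro he a ha
    rw [Finset.sum_eq_zero_iff]
    intro b hb
    exact (pvInd_eq_zero park _ _).2
      (he a (Finset.mem_range.1 ha) b (Finset.mem_range.1 hb))

lemma pvFeasible_iff (park : List (List String)) (h w s : Nat)
    (hsh : s ≤ h) (hsw : s ≤ w) :
    pvFeasible (pvBuildP park h w) h w s = true ↔ pvWin park h w s := by
  rw [pvFeasible, List.any_eq_true]
  constructor
  · rintro ⟨i, hi, hinner⟩
    rw [List.any_eq_true] at hinner
    obtain ⟨j, hj, hexpr⟩ := hinner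
    rw [List.mem_range] at hi hj
    rw [beq_iff_eq] at hexpr
    exact ⟨i, j, by omega, by omega,
      (pvExpr_iff park h w s i j (by omega) (by omega)).1 hexpr⟩
  · rintro ⟨i, j, hi, hj, hcells⟩
    refine ⟨i, List.mem_range.2 (by omega), ?_⟩
    rw [List.any_eq_true]
    exact ⟨j, List.mem_range.2 (by omega), beq_iff_eq.2
      ((pvExpr_iff park h w s i j hi hj).2 hcells)⟩

lemma pvBSearch_eq (f : Nat → Bool) (M lo hi : Nat)
    (hloM : lo ≤ M) (hMhi : M ≤ hi)
    (hT : ∀ s, s ≤ M → f s = true)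
    (hF : ∀ s, M < s → s ≤ hi → f s = false) :
    pvBSearch f lo hi = M := by
  have key : ∀ d lo hi, hi - lo = d → lo ≤ M → M ≤ hi →
      (∀ s, M < s → s ≤ hi → f s = false) → pvBSearch f lo hi = M := by
    intro d
    induction d using Nat.strong_induction_on with
    | _ d IH =>
      rintro lo hi rfl hloM hMhi hF
      rw [pvBSearch]
      by_cases hlt : lo < hi
      · rw [dif_pos hlt]
        have hmlo : lo < (lo + hi + 1) / 2 := by omega
        have hmhi : (lo + hi + 1) / 2 ≤ hi := by omega
        by_cases hf : f ((lo + hi + 1) / 2) = true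
        · rw [if_pos hf]
          have hmM : (lo + hi + 1) / 2 ≤ M := by
            by_contra hc
            rw [hF _ (by omega) hmhi] at hf
            exact Bool.false_ne_true hf
          exact IH (hi - (lo + hi + 1) / 2) (by omega) _ hi rfl hmM hMhi hF
        · rw [if_neg hf]
          have hMmid : M < (lo + hi + 1) / 2 := by
            by_contra hc
            exact hf (hT _ (by omega))
          exact IH ((lo + hi + 1) / 2 - 1 - lo) (by omega) lo _ rfl hloM (by omega)
            (fun s hs1 hs2 => hF s hs1 (by omega))
      · rw [dif_neg hlt]; omega
  exact key (hi - lo) lo hi rfl hloM hMhi hF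


def pvPmax (park : List (List String)) (w i j : Nat) : Nat :=
  max (pvMA park i w) ((Finset.range j).sup (pvBest park i))

def pvInv (park : List (List String)) (h w i j : Nat) (st : List (List Int) × Int) : Prop :=
  st.1.length = h ∧
  (∀ r, r < h → (st.1.getD r []).length = w) ∧
  (∀ r c, r < i → c < w → pvGet2 st.1 r c = (pvBest park r c : Int)) ∧
  (∀ c, c < j → pvGet2 st.1 i c = (pvBest park i c : Int)) ∧
  (∀ c, j ≤ c → c < w → pvGet2 st.1 i c = 0) ∧
  (∀ r c, i < r → r < h → c < w → pvGet2 st.1 r c = 0) ∧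
  st.2 = (pvPmax park w i j : Int)

lemma pvSupSucc (f : Nat → Nat) (n : Nat) :
    (Finset.range (n+1)).sup f = max ((Finset.range n).sup f) (f n) := by
  rw [Finset.range_add_one, Finset.sup_insert]
  exact max_comm _ _

lemma pvPmax_succ (park : List (List String)) (w i j : Nat) :
    pvPmax park w i (j+1) = max (pvPmax park w i j) (pvBest park i j) := by
  rw [pvPmax, pvPmax, pvSupSucc]
  omega

lemma pvPmax_row (park : List (List String)) (w i : Nat) :
    pvPmax park w (i+1) 0 = pvPmax park w i w := by
  rw [pvPmax, pvPmax, pvMA, pvSupSucc, ← pvMA, ← pvRowMax]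
  simp only [pvRowMax, Finset.range_zero, Finset.sup_empty, Nat.bot_eq_zero]
  omega

lemma pvGetD_set {α : Type} (l : List α) (i r : Nat) (x : α) (d : α) :
    (l.set i x).getD r d = if r = i ∧ i < l.length then x else l.getD r d := by
  simp only [List.getD_eq_getElem?_getD, List.getElem?_set]
  by_cases hri : i = r
  · subst hri
    by_cases hl : i < l.length
    · simp [hl]
    · simp [hl]
  · rw [if_neg hri, if_neg (by tauto)]

lemma pvSet2_length (space : List (List Int)) (i j : Nat) (v : Int) :
    (pvSet2 space i j v).length = space.length := by
  rw [pvSet2, List.length_set]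

lemma pvSet2_rowlen (space : List (List Int)) (i j r : Nat) (v : Int) :
    ((pvSet2 space i j v).getD r []).length = (space.getD r []).length := by
  rw [pvSet2, pvGetD_set]
  split_ifs with hc
  · obtain ⟨h1, _⟩ := hc
    subst h1
    rw [List.length_set]
  · rfl

lemma pvGet2_set2_self (space : List (List Int)) (i j : Nat) (v : Int)
    (hi : i < space.length) (hj : j < (space.getD i []).length) :
    pvGet2 (pvSet2 space i j v) i j = v := by
  rw [pvGet2, pvSet2, pvGetD_set, if_pos ⟨rfl, hi⟩, pvGetD_set, if_pos ⟨rfl, hj⟩]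

lemma pvGet2_set2_ne (space : List (List Int)) (i j r c : Nat) (v : Int)
    (hne : r ≠ i ∨ c ≠ j) :
    pvGet2 (pvSet2 space i j v) r c = pvGet2 space r c := by
  rw [pvGet2, pvGet2, pvSet2, pvGetD_set]
  split_ifs with hc
  · obtain ⟨h1, _⟩ := hc
    subst h1
    have hcj : c ≠ j := by tauto
    rw [pvGetD_set, if_neg (by tauto)]
  · rfl

lemma pvGet2_out (space : List (List Int)) (r c : Nat) (hr : space.length ≤ r) :
    pvGet2 space r c = 0 := by
  rw [pvGet2, List.getD_eq_getElem?_getD (l := space), List.getElem?_eq_none hr]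
  rfl

lemma pvStep (park : List (List String)) (h w i j : Nat) (st : List (List Int) × Int)
    (hi : i < h) (hj : j < w) (hInv : pvInv park h w i j st) :
    pvInv park h w i (j+1) (pvAStep park i j st) := by
  obtain ⟨hL, hRL, hDone, hRow, hRow0, hBelow0, hMax⟩ := hInv
  rw [pvAStep]
  by_cases hE : (park.getD i []).getD j "" = "-1"
  · rw [if_pos hE]
    have hBestEq :
        (if i = 0 ∨ j = 0 then (1:Int)
         else 1 + min (min (pvGet2 st.1 (i-1) j) (pvGet2 st.1 (i-1) (j-1)))
                      (pvGet2 st.1 i (j-1)))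
        = (pvBest park i j : Int) := by
      by_cases h0 : i = 0 ∨ j = 0
      · rw [if_pos h0, pvBest, if_pos hE, dif_pos h0]
        norm_num
      · rw [if_neg h0]
        have hi0 : 0 < i := by omega
        have hj0 : 0 < j := by omega
        have hrec : pvBest park i j
            = 1 + min (min (pvBest park (i-1) j) (pvBest park (i-1) (j-1)))
                      (pvBest park i (j-1)) := by
          conv_lhs => rw [pvBest]
          rw [if_pos hE, dif_neg h0]
        rw [hDone (i-1) j (by omega) hj, hDone (i-1) (j-1) (by omega) (by omega),
            hRow (j-1) (by omega), hrec]
        push_cast [Nat.cast_min]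
        ring
    have hiL : i < st.1.length := by omega
    have hjL : j < (st.1.getD i []).length := by rw [hRL i hi]; omega
    refine ⟨?_, ?_, ?_, ?_, ?_, ?_, ?_⟩
    · rw [pvSet2_length]; exact hL
    · intro r hr; rw [pvSet2_rowlen]; exact hRL r hr
    · intro r c hr hc
      rw [pvGet2_set2_ne _ _ _ _ _ _ (Or.inl (by omega))]
      exact hDone r c hr hc
    · intro c hc
      by_cases hcj : c = j
      · subst hcj
        rw [pvGet2_set2_self _ _ _ _ hiL hjL]
        exact hBestEq
      · rw [pvGet2_set2_ne _ _ _ _ _ _ (Or.inr hcj)]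
        exact hRow c (by omega)
    · intro c hc1 hc2
      rw [pvGet2_set2_ne _ _ _ _ _ _ (Or.inr (by omega))]
      exact hRow0 c (by omega) hc2
    · intro r c hr1 hr2 hc
      rw [pvGet2_set2_ne _ _ _ _ _ _ (Or.inl (by omega))]
      exact hBelow0 r c hr1 hr2 hc
    · show max st.2 _ = _
      rw [hMax, hBestEq, pvPmax_succ]
      push_cast [Nat.cast_max]
      ring
  · rw [if_neg hE]
    have hBest0 : pvBest park i j = 0 := by rw [pvBest, if_neg hE]
    refine ⟨hL, hRL, hDone, ?_, ?_, hBelow0, ?_⟩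
    · intro c hc
      by_cases hcj : c = j
      · subst hcj
        rw [hRow0 c le_rfl hj, hBest0]
        norm_num
      · exact hRow c (by omega)
    · intro c hc1 hc2
      exact hRow0 c (by omega) hc2
    · rw [hMax, pvPmax_succ, hBest0]
      norm_num

lemma pvInnerLoop (park : List (List String)) (h w i : Nat) (st : List (List Int) × Int)
    (hi : i < h) (hInv : pvInv park h w i 0 st) :
    ∀ m, m ≤ w →
      pvInv park h w i m ((List.range m).foldl (fun st j => pvAStep park i j st) st) := by
  intro m
  induction m with
  | zero => intro _; simpa using hInv
  | succ m ih =>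
    intro hm
    rw [show List.range (m+1) = List.range m ++ [m] from List.range_succ, List.foldl_append]
    simp only [List.foldl_cons, List.foldl_nil]
    exact pvStep park h w i m _ hi (by omega) (ih (by omega))

lemma pvOuterAdvance (park : List (List String)) (h w i : Nat) (st : List (List Int) × Int)
    (hInv : pvInv park h w i w st) : pvInv park h w (i+1) 0 st := by
  obtain ⟨hL, hRL, hDone, hRow, _, hBelow0, hMax⟩ := hInv
  refine ⟨hL, hRL, ?_, ?_, ?_, ?_, ?_⟩
  · intro r c hr hc
    by_cases hri : r = i
    · subst hri; exact hRow c hc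
    · exact hDone r c (by omega) hc
  · intro c hc; omega
  · intro c _ hc
    by_cases hih : i + 1 < h
    · exact hBelow0 (i+1) c (by omega) hih hc
    · exact pvGet2_out st.1 (i+1) c (by omega)
  · intro r c hr1 hr2 hc
    exact hBelow0 r c (by omega) hr2 hc
  · rw [hMax, pvPmax_row]


lemma pvFindDesc (L : List Int) (p : Int → Bool) (hP : L.Pairwise (fun a b => b ≤ a))
    (f : Int) (hf : L.find? p = some f) : ∀ y ∈ L, p y = true → y ≤ f := by
  induction L with
  | nil => simp at hf
  | cons a t ih =>
    intro y hy hpy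
    rw [List.pairwise_cons] at hP
    cases hpa : p a with
    | true =>
      rw [List.find?_cons_of_pos hpa, Option.some_inj] at hf
      subst hf
      rcases List.mem_cons.1 hy with rfl | hyt
      · exact le_refl _
      · exact hP.1 y hyt
    | false =>
      rw [List.find?_cons_of_neg (by simp [hpa])] at hf
      rcases List.mem_cons.1 hy with rfl | hyt
      · rw [hpa] at hpy; exact absurd hpy (by simp)
      · exact ih hP.2 hf y hyt hpy

lemma pvSelect (mats : List Int) (K : Int) :
    ((PySem.List.sorted mats (fun x => x) true).find? (fun m => decide (m ≤ K))).getD (-1)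
    = (PySem.List.max? (mats.filter (fun m => decide (m ≤ K))) (fun x => x)).getD (-1) := by
  have hperm : (PySem.List.sorted mats (fun x => x) true).Perm mats :=
    PySem.List.sorted_perm mats (fun x => x) true
  cases hf : (PySem.List.sorted mats (fun x => x) true).find? (fun m => decide (m ≤ K)) with
  | none =>
    rw [List.find?_eq_none] at hf
    have hfil : mats.filter (fun m => decide (m ≤ K)) = [] := by
      rw [List.filter_eq_nil_iff]
      intro a ha
      exact hf a (hperm.mem_iff.2 ha)
    rw [hfil]
    rfl
  | some f =>
    have hfK : decide (f ≤ K) = true := by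
      have := List.find?_some hf
      simpa using this
    have hfL : f ∈ PySem.List.sorted mats (fun x => x) true := List.mem_of_find?_eq_some hf
    have hfmats : f ∈ mats := hperm.mem_iff.1 hfL
    have hffil : f ∈ mats.filter (fun m => decide (m ≤ K)) := List.mem_filter.2 ⟨hfmats, hfK⟩
    cases hm : PySem.List.max? (mats.filter (fun m => decide (m ≤ K))) (fun x => x) with
    | none =>
      rw [PySem.List.max?_eq_none_iff] at hm
      rw [hm] at hffil
      simp at hffil
    | some m =>
      have hmmem : m ∈ mats.filter (fun m => decide (m ≤ K)) := PySem.List.max?_mem hm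
      have hmax := PySem.List.max?_isMax hm
      have h1 : f ≤ m := hmax f hffil
      obtain ⟨hm_mats, hmK⟩ := List.mem_filter.1 hmmem
      have h2 : m ≤ f := pvFindDesc _ _
        (by
          have := PySem.List.sorted_pairwise_rev mats (fun x => x)
          exact this) f hf m (hperm.mem_iff.2 hm_mats) hmK
      rw [le_antisymm h1 h2]


-- glue: A's maxv is pvMA, B's binary-search result is pvMA, and both selections agree

lemma pvInit (park : List (List String)) (h w : Nat) :
    pvInv park h w 0 0 ((List.range h).map (fun _ => List.replicate w (0:Int)), 0) := by
  have hz : ∀ r c : Nat,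
      pvGet2 ((List.range h).map (fun _ => List.replicate w (0:Int))) r c = 0 := by
    intro r c
    by_cases hr : r < h
    · rw [pvGet2, PySem.List.getD_map_range _ _ _ _ hr]
      by_cases hc : c < w
      · rw [List.getD_replicate _ hc]
      · rw [List.getD_eq_getElem?_getD, List.getElem?_eq_none (by simp; omega)]
        rfl
    · exact pvGet2_out _ r c (by simp; omega)
  refine ⟨by simp, ?_, ?_, ?_, ?_, ?_, ?_⟩
  · intro r hr
    rw [PySem.List.getD_map_range _ _ _ _ hr, List.length_replicate]
  · intro r c hr; omega
  · intro c hc; omega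
  · intro c _ hc; exact hz 0 c
  · intro r c _ _ _; exact hz r c
  · simp [pvPmax, pvMA]

lemma pvOuterLoop (park : List (List String)) (h w : Nat) :
    ∀ m, m ≤ h →
      pvInv park h w m 0 ((List.range m).foldl (fun st i =>
        (List.range w).foldl (fun st j => pvAStep park i j st) st)
        ((List.range h).map (fun _ => List.replicate w (0:Int)), 0)) := by
  intro m
  induction m with
  | zero => intro _; simpa using pvInit park h w
  | succ m ih =>
    intro hm
    rw [show List.range (m+1) = List.range m ++ [m] from List.range_succ, List.foldl_append]
    simp only [List.foldl_cons, List.foldl_nil]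
    exact pvOuterAdvance park h w m _
      (pvInnerLoop park h w m _ (by omega) (ih (by omega)) w le_rfl)

lemma pvA_maxv (park : List (List String)) (h w : Nat) :
    ((List.range h).foldl (fun st i =>
        (List.range w).foldl (fun st j => pvAStep park i j st) st)
        ((List.range h).map (fun _ => List.replicate w (0:Int)), 0)).2
      = (pvMA park h w : Int) := by
  have := (pvOuterLoop park h w h le_rfl).2.2.2.2.2.2
  rw [this]
  norm_cast
  simp [pvPmax]

lemma pvB_lo (park : List (List String)) (h w : Nat) :
    pvBSearch (fun s => pvFeasible (pvBuildP park h w) h w s) 0 (min h w)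
      = pvMA park h w := by
  apply pvBSearch_eq _ _ _ _ (Nat.zero_le _) (pvMA_le_min park h w)
  · intro s hs
    have hmin := pvMA_le_min park h w
    exact (pvFeasible_iff park h w s (by omega) (by omega)).2
      (pvWin_mono park h w s _ hs (pvWin_MA park h w))
  · intro s hs1 hs2
    cases hfs : pvFeasible (pvBuildP park h w) h w s with
    | false => rfl
    | true =>
      have hwin := (pvFeasible_iff park h w s (by omega) (by omega)).1 hfs
      have := pvWin_le_MA park h w s hwin
      omega

lemma solution_eq (mats : List Int) (park : List (List String)) :
    solution mats park
      = ((PySem.List.sorted mats (fun x => x) true).find?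
          (fun m => decide (m ≤ (pvMA park park.length (park.getD 0 []).length : Int)))).getD
          (-1) := by
  rw [solution]
  rw [pvA_maxv park park.length (park.getD 0 []).length]

lemma solution_alt_eq (mats : List Int) (park : List (List String)) :
    solution_alt mats park
      = (PySem.List.max? (mats.filter
          (fun m => decide (m ≤ (pvMA park park.length (park.getD 0 []).length : Int))))
          (fun x => x)).getD (-1) := by
  rw [solution_alt]
  rw [pvB_lo park park.length (park.getD 0 []).length]

-- ===== VERDICT (by name: the statement is the Claim_ definition above) =====
theorem solution_spec : Claim_equal_solution := by
  intro mats park _hdom _hpre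
  show solution mats park = solution_alt mats park
  rw [solution_eq, solution_alt_eq]
  exact pvSelect mats _
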